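-- pv_equiv track=rewrite | github.com/isklenar/brainfuck-py | brainx_convertors/braincopter.py | __get_closest_colour
-- ===== SOURCE A (Python) =====
-- def __get_closest_colour(rgb, value):
--     """
--     Najde nejblizsi RGB hodnotu vstupnimu parametru.
--     :param rgb:
--     :param value:
--     :return:
--     """
--     orig_value = (65536 * rgb[0] + 256 * rgb[1] + rgb[2]) % 11
--     diff = abs(value - orig_value)
--
--     if diff == 0:
--         return rgb
--
--     if 255 >= rgb[2] + 10 >= 0:  # padne do intervalu
--         for x in range(11):
--             new_val = (65536 * rgb[0] + 256 * rgb[1] + (rgb[2] + x)) % 11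
--             if new_val == value:
--                 return rgb[0], rgb[1], rgb[2] + x
--
--     elif rgb[2] + 10 > 255:  # misto preteceni odecist
--         for x in range(11):
--             new_val = (65536 * rgb[0] + 256 * rgb[1] + (rgb[2] - x)) % 11
--             if new_val == value:
--                 return rgb[0], rgb[1], rgb[2] - x
-- ===== SOURCE B (Python) =====
-- def __get_closest_colour(rgb, value):
--     orig_value = (65536 * rgb[0] + 256 * rgb[1] + rgb[2]) % 11
--     if value == orig_value:
--         return rgb
--     if not (0 <= value <= 10):
--         return None
--     if -10 <= rgb[2] <= 245:
--         return rgb[0], rgb[1], rgb[2] + (value - orig_value) % 11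
--     if rgb[2] > 245:
--         return rgb[0], rgb[1], rgb[2] - (orig_value - value) % 11
--     return None
-- ===== Notes on version B (the rewrite author's own statement) =====
-- stated objective: simpler
-- what changed: Both 11-iteration search loops are replaced by a direct closed-form offset (value - orig_value) % 11 (resp. (orig_value - value) % 11), guarded by an explicit 0 <= value <= 10 range check.
import Mathlib
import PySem

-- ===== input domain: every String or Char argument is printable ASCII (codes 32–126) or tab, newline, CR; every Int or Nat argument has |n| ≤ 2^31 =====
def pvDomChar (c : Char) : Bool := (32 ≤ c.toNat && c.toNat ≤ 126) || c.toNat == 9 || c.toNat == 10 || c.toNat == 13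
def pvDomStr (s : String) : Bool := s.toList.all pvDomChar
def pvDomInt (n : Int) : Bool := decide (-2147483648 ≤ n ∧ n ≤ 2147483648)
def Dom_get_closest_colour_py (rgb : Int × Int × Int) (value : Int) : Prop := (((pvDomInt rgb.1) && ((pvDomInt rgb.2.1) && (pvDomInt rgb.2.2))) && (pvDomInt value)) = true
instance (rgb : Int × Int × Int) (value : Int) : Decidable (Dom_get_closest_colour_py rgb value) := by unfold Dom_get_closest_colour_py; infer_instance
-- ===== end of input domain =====

-- B replaces A's two 11-step search loops by the direct closed-form offset (value - orig_value) % 11; objective: simpler, same exact results.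

-- ===== PORT A =====
-- 'for x in range(11): … if new_val == value: return rgb[0], rgb[1], rgb[2]+x' (first match wins)
def pvLoopAdd (a b c value : Int) : List Int → Option (Int × Int × Int)
  | [] => none
  | x :: xs =>
    if PySem.Int.mod (65536 * a + 256 * b + (c + x)) 11 = value then some (a, b, c + x)
    else pvLoopAdd a b c value xs

-- the subtract-branch loop: '… return rgb[0], rgb[1], rgb[2]-x'
def pvLoopSub (a b c value : Int) : List Int → Option (Int × Int × Int)
  | [] => none
  | x :: xs =>
    if PySem.Int.mod (65536 * a + 256 * b + (c - x)) 11 = value then some (a, b, c - x)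
    else pvLoopSub a b c value xs

def get_closest_colour_py (rgb : Int × Int × Int) (value : Int) : Option (Int × Int × Int) :=
  let orig_value := PySem.Int.mod (65536 * rgb.1 + 256 * rgb.2.1 + rgb.2.2) 11
  let diff := |value - orig_value|
  if diff = 0 then some rgb
  else if 255 ≥ rgb.2.2 + 10 ∧ rgb.2.2 + 10 ≥ 0 then
    pvLoopAdd rgb.1 rgb.2.1 rgb.2.2 value (PySem.List.pyRange 0 11 1)
  else if rgb.2.2 + 10 > 255 then
    pvLoopSub rgb.1 rgb.2.1 rgb.2.2 value (PySem.List.pyRange 0 11 1)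
  else none

-- ===== PORT B =====
def get_closest_colour_py_alt (rgb : Int × Int × Int) (value : Int) : Option (Int × Int × Int) :=
  let orig_value := PySem.Int.mod (65536 * rgb.1 + 256 * rgb.2.1 + rgb.2.2) 11
  if value = orig_value then some rgb
  else if ¬ (0 ≤ value ∧ value ≤ 10) then none
  else if -10 ≤ rgb.2.2 ∧ rgb.2.2 ≤ 245 then
    some (rgb.1, rgb.2.1, rgb.2.2 + PySem.Int.mod (value - orig_value) 11)
  else if rgb.2.2 > 245 then
    some (rgb.1, rgb.2.1, rgb.2.2 - PySem.Int.mod (orig_value - value) 11)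
  else none

-- ===== PRECONDITION & SPEC =====
def Spec_get_closest_colour_py (rgb : Int × Int × Int) (value : Int) (out : Option (Int × Int × Int)) : Prop := out = get_closest_colour_py_alt rgb value
instance (rgb : Int × Int × Int) (value : Int) (out : Option (Int × Int × Int)) : Decidable (Spec_get_closest_colour_py rgb value out) := by unfold Spec_get_closest_colour_py; infer_instance

-- ===== CLAIM (what is proved, stated in full; the proofs are below) =====
def Claim_equal_get_closest_colour_py : Prop := ∀ (rgb : Int × Int × Int) (value : Int), Dom_get_closest_colour_py rgb value → Spec_get_closest_colour_py rgb value (get_closest_colour_py rgb value)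

-- ===== LEMMAS AND PROOFS =====
theorem pvMod_eq (x : Int) : PySem.Int.mod x 11 = x % 11 :=
  PySem.Int.mod_eq_emod_of_pos (by norm_num)

set_option maxHeartbeats 2000000 in
theorem pvLoopAdd_char (a b c value : Int) :
    pvLoopAdd a b c value [0,1,2,3,4,5,6,7,8,9,10] =
      (if 0 ≤ value ∧ value ≤ 10 then
        some (a, b, c + (value - (65536 * a + 256 * b + c) % 11) % 11) else none) := by
  simp only [pvLoopAdd, pvMod_eq,
    show ∀ x : Int, 65536 * a + 256 * b + (c + x) = (65536 * a + 256 * b + c) + x from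
      fun x => by ring]
  generalize 65536 * a + 256 * b + c = base
  split_ifs <;>
    first
      | rfl
      | omega
      | (simp only [Option.some.injEq, Prod.mk.injEq, true_and]; omega)

set_option maxHeartbeats 2000000 in
theorem pvLoopSub_char (a b c value : Int) :
    pvLoopSub a b c value [0,1,2,3,4,5,6,7,8,9,10] =
      (if 0 ≤ value ∧ value ≤ 10 then
        some (a, b, c - ((65536 * a + 256 * b + c) % 11 - value) % 11) else none) := by
  simp only [pvLoopSub, pvMod_eq,
    show ∀ x : Int, 65536 * a + 256 * b + (c - x) = (65536 * a + 256 * b + c) - x from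
      fun x => by ring]
  generalize 65536 * a + 256 * b + c = base
  split_ifs <;>
    first
      | rfl
      | omega
      | (simp only [Option.some.injEq, Prod.mk.injEq, true_and]; omega)

-- ===== VERDICT (by name: the statement is the Claim_ definition above) =====
set_option maxHeartbeats 1000000 in
theorem get_closest_colour_py_spec : Claim_equal_get_closest_colour_py := by
  intro rgb value _
  obtain ⟨a, b, c⟩ := rgb
  unfold Spec_get_closest_colour_py get_closest_colour_py get_closest_colour_py_alt
  have hr : PySem.List.pyRange 0 11 1 = [0,1,2,3,4,5,6,7,8,9,10] := by decide
  simp only [hr, pvLoopAdd_char, pvLoopSub_char, pvMod_eq, abs_eq_zero, sub_eq_zero]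
  split_ifs <;> first | rfl | omega
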